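-- pv_equiv track=rewrite | github.com/jfrey89/python-fem | ap/mesh/meshtools.py | organize_edges
-- ===== SOURCE A (Python) =====
-- def organize_edges(edges, borders={}, default_border="land"):
--     if default_border in borders:
--         raise ValueError("Specific border and default border share same name")
--
--     edge_collections = dict()
--     edge_collections[default_border] = set(edges)
--     for border, labels in borders.items():
--         edge_collections[border] = set(filter(lambda x : x[-1] in labels,
--                                               edge_collections[default_border]))
--         edge_collections[default_border] -= edge_collections[border]
--
--     return edge_collections
-- ===== SOURCE B (Python) =====
-- def organize_edges(edges, borders={}, default_border="land"):
--     if default_border in borders: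
--         raise ValueError("Specific border and default border share same name")
--
--     # label -> the first border (in insertion order) whose label list contains it
--     owner_of_label = {}
--     for border, labels in borders.items():
--         for lab in labels:
--             owner_of_label.setdefault(lab, border)
--
--     buckets = {default_border: set()}
--     for border in borders:
--         buckets[border] = set()
--
--     for e in edges:
--         key = e[-1] if e else None
--         buckets[owner_of_label.get(key, default_border)].add(e)
--
--     return buckets
-- ===== Notes on version B (the rewrite author's own statement) =====
-- stated objective: faster
-- what changed: Instead of re-filtering and subtracting the shrinking default set once per border (O(B*E*L)), B builds a label->first-owning-border map once and routes every edge in a single pass (O(E + L)).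
import Mathlib
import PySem

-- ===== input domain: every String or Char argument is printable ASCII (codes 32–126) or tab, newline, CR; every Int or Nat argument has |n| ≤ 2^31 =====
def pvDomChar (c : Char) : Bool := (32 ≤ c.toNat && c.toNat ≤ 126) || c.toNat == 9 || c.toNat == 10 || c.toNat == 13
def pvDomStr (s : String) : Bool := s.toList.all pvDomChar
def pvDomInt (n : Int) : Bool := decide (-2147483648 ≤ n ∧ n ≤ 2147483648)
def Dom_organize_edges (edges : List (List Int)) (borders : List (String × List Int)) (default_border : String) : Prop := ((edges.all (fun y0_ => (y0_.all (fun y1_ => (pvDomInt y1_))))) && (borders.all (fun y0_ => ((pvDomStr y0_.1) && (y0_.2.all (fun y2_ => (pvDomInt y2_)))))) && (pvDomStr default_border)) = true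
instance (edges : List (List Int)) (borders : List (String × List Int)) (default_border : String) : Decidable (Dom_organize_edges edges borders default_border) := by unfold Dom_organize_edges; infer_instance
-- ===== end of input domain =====

-- B replaces A's per-border filter-and-subtract passes over the default set by one
-- label→first-border map plus a single routing pass over the edges; return values agree on Pre_.

-- ===== PORT A =====
-- x[-1] in labels  (pyGet? = none means Python raises IndexError there; those inputs are outside Pre_)
def pvLastIn (labels : List Int) (x : List Int) : Bool :=
  match PySem.List.pyGet? x (-1) with
  | some v => decide (v ∈ labels)
  | none => false

-- the Python receives `borders` as a dict: the assoc list is converted via PySem.Dict.ofList;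
-- `raise ValueError` is outside Pre_, the port returns [] there
def organize_edges (edges : List (List Int)) (borders : List (String × List Int)) (default_border : String) : List (String × List (List Int)) :=
  let bd := PySem.Dict.ofList borders
  if bd.contains default_border then []
  else
    let ec0 : PySem.Dict String (PySem.Set (List Int)) :=
      PySem.Dict.empty.insert default_border (PySem.Set.ofList edges)
    let ec := bd.items.foldl (fun (ec : PySem.Dict String (PySem.Set (List Int))) p =>
      let cur := ec.getD default_border PySem.Set.empty
      let matched := cur.filter (pvLastIn p.2)
      let ec2 := ec.insert p.1 matched
      ec2.insert default_border (PySem.Set.diff cur matched)) ec0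
    ec.items

-- ===== PORT B =====
-- key = e[-1] if e else None; owner_of_label.get(key, default_border)
def pvKeyB (owner : PySem.Dict Int String) (default_border : String) (e : List Int) : String :=
  let key : Option Int := if e = [] then none else PySem.List.pyGet? e (-1)
  match key with
  | some v => owner.getD v default_border
  | none => default_border

def organize_edges_alt (edges : List (List Int)) (borders : List (String × List Int)) (default_border : String) : List (String × List (List Int)) :=
  let bd := PySem.Dict.ofList borders
  if bd.contains default_border then []
  else
    let owner : PySem.Dict Int String :=
      bd.items.foldl (fun d p => p.2.foldl (fun d lab => d.setdefault lab p.1) d) PySem.Dict.empty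
    let buckets0 : PySem.Dict String (PySem.Set (List Int)) :=
      bd.items.foldl (fun d p => d.insert p.1 PySem.Set.empty)
        (PySem.Dict.empty.insert default_border PySem.Set.empty)
    let buckets := edges.foldl (fun (d : PySem.Dict String (PySem.Set (List Int))) e =>
      d.modify (pvKeyB owner default_border e) PySem.Set.empty (fun s => PySem.Set.add s e)) buckets0
    buckets.items

-- ===== PRECONDITION & SPEC =====
-- Pre_ excludes exactly the inputs where A raises: ValueError when default_border is a key of
-- borders, and IndexError (edge[-1]) when borders is nonempty and some edge is the empty tuple.
def Pre_organize_edges (edges : List (List Int)) (borders : List (String × List Int)) (default_border : String) : Prop :=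
  (∀ p ∈ borders, p.1 ≠ default_border) ∧ (borders = [] ∨ ∀ e ∈ edges, e ≠ [])
instance (edges : List (List Int)) (borders : List (String × List Int)) (default_border : String) : Decidable (Pre_organize_edges edges borders default_border) := by unfold Pre_organize_edges; infer_instance

def pvWitness_organize_edges : List (List Int) × (List (String × List Int)) × String :=
  ([[1, 2, 5], [2, 3, 7], [3, 1, 5]], [("sea", [7, 8]), ("wall", [5])], "land")

def Spec_organize_edges (edges : List (List Int)) (borders : List (String × List Int)) (default_border : String) (out : List (String × List (List Int))) : Prop := out = organize_edges_alt edges borders default_border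
instance (edges : List (List Int)) (borders : List (String × List Int)) (default_border : String) (out : List (String × List (List Int))) : Decidable (Spec_organize_edges edges borders default_border out) := by unfold Spec_organize_edges; infer_instance

-- ===== CLAIM (what is proved, stated in full; the proofs are below) =====
def Claim_equal_organize_edges : Prop := ∀ (edges : List (List Int)) (borders : List (String × List Int)) (default_border : String), Dom_organize_edges edges borders default_border → Pre_organize_edges edges borders default_border → Spec_organize_edges edges borders default_border (organize_edges edges borders default_border)

-- ===== LEMMAS AND PROOFS =====
-- route of an edge: first border whose labels contain its last node, else the default
def pvRoute (default : String) (bl : List (String × List Int)) (e : List Int) : String :=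
  match bl with
  | [] => default
  | p :: rest => if pvLastIn p.2 e then p.1 else pvRoute default rest e

def pvOwn (bl : List (String × List Int)) (v : Int) : Option String :=
  match bl with
  | [] => none
  | p :: rest => if v ∈ p.2 then some p.1 else pvOwn rest v

lemma pvRoute_mem (default : String) (bl : List (String × List Int)) (e : List Int) :
    pvRoute default bl e = default ∨ pvRoute default bl e ∈ bl.map Prod.fst := by
  induction bl with
  | nil => left; rfl
  | cons p rest ih =>
    by_cases h : pvLastIn p.2 e
    · right; simp [pvRoute, h]
    · rcases ih with h' | h'
      · left; simpa [pvRoute, h]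
      · right; simp [pvRoute, h, h']

lemma set_diff_filter (S : List (List Int)) (P : List Int → Bool) :
    PySem.Set.diff S (S.filter P) = S.filter (fun x => !P x) := by
  unfold PySem.Set.diff
  apply List.filter_congr
  intro x hx
  simp [List.mem_filter, hx]

lemma A_fold_items (default : String) (bl : List (String × List Int)) (S : List (List Int)) (acc : List (String × List (List Int)))
    (hacc : ∀ q ∈ acc, q.1 ≠ default)
    (hbld : ∀ p ∈ bl, p.1 ≠ default)
    (hbacc : ∀ p ∈ bl, p.1 ∉ acc.map Prod.fst)
    (hnd : (bl.map Prod.fst).Nodup) :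
    (bl.foldl (fun (ec : PySem.Dict String (PySem.Set (List Int))) p =>
        let cur := ec.getD default PySem.Set.empty
        let matched := cur.filter (pvLastIn p.2)
        let ec2 := ec.insert p.1 matched
        ec2.insert default (PySem.Set.diff cur matched))
      (PySem.Dict.mk ((default, S) :: acc))).items
    = (default, S.filter (fun e => pvRoute default bl e == default))
        :: (acc ++ bl.map (fun p => (p.1, S.filter (fun e => pvRoute default bl e == p.1)))) := by
  induction bl generalizing S acc with
  | nil => simp [pvRoute]
  | cons p rest ih =>
    have hp_ne : p.1 ≠ default := hbld p (by simp)
    have hp_acc : p.1 ∉ acc.map Prod.fst := hbacc p (by simp)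
    have hnd1 : p.1 ∉ rest.map Prod.fst ∧ (rest.map Prod.fst).Nodup := by
      rw [List.map_cons] at hnd; exact List.nodup_cons.mp hnd
    -- one step of the fold
    have hcur : (PySem.Dict.mk ((default, S) :: acc)).getD default PySem.Set.empty = S := by
      simp [PySem.Dict.getD, PySem.Dict.get?]
    have hcont1 : (PySem.Dict.mk ((default, S) :: acc)).contains p.1 = false := by
      simp only [PySem.Dict.contains, List.any_eq_false]
      intro q hq
      simp only [List.mem_cons] at hq
      rcases hq with rfl | hq
      · intro h; exact hp_ne (eq_of_beq h).symm
      · intro h; exact hp_acc (List.mem_map.mpr ⟨q, hq, eq_of_beq h⟩)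
    have hd1 : (PySem.Dict.mk ((default, S) :: acc)).insert p.1 (S.filter (pvLastIn p.2))
        = PySem.Dict.mk (((default, S) :: acc) ++ [(p.1, S.filter (pvLastIn p.2))]) := by
      simp [PySem.Dict.insert, hcont1]
    have hcont2 : (PySem.Dict.mk (((default, S) :: acc) ++ [(p.1, S.filter (pvLastIn p.2))])).contains default = true := by
      simp [PySem.Dict.contains]
    have hd2 : (PySem.Dict.mk (((default, S) :: acc) ++ [(p.1, S.filter (pvLastIn p.2))])).insert default
          (PySem.Set.diff S (S.filter (pvLastIn p.2)))
        = PySem.Dict.mk ((default, S.filter (fun x => !pvLastIn p.2 x)) :: (acc ++ [(p.1, S.filter (pvLastIn p.2))])) := by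
      rw [set_diff_filter]
      simp only [PySem.Dict.insert, hcont2, if_pos]
      congr 1
      simp only [List.map_cons, List.map_append, List.map_nil, beq_self_eq_true, if_pos, List.cons_append]
      congr 1
      congr 1
      · refine (List.map_congr_left ?_).trans (List.map_id acc)
        intro q hq
        exact if_neg (fun h => hacc q hq (eq_of_beq h))
      · rw [if_neg (fun h => hp_ne (eq_of_beq h))]
    have hpred_def : ∀ e, (pvRoute default (p :: rest) e == default) = (!pvLastIn p.2 e && (pvRoute default rest e == default)) := by
      intro e; by_cases h : pvLastIn p.2 e <;> simp [pvRoute, h, hp_ne]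
    have hhead : ∀ e, (pvRoute default (p :: rest) e == p.1) = pvLastIn p.2 e := by
      intro e; by_cases h : pvLastIn p.2 e
      · simp [pvRoute, h]
      · have hne : pvRoute default rest e ≠ p.1 := by
          rcases pvRoute_mem default rest e with hr | hr
          · rw [hr]; exact Ne.symm hp_ne
          · exact fun hq => hnd1.1 (hq ▸ hr)
        simp [pvRoute, h, hne]
    have htail : ∀ q ∈ rest, ∀ e, (pvRoute default (p :: rest) e == q.1) = (!pvLastIn p.2 e && (pvRoute default rest e == q.1)) := by
      intro q hq e; by_cases h : pvLastIn p.2 e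
      · have hne : p.1 ≠ q.1 := fun hh => hnd1.1 (hh ▸ List.mem_map.mpr ⟨q, hq, rfl⟩)
        simp [pvRoute, h, hne]
      · simp [pvRoute, h]
    rw [List.foldl_cons]
    simp only [hcur]
    rw [hd1, hd2]
    rw [ih (S.filter (fun x => !pvLastIn p.2 x)) (acc ++ [(p.1, S.filter (pvLastIn p.2))])
        (by intro q hq
            rcases List.mem_append.mp hq with hq | hq
            · exact hacc q hq
            · simp at hq; subst hq; exact hp_ne)
        (fun q hq => hbld q (List.mem_cons_of_mem _ hq))
        (by intro q hq
            simp only [List.map_append, List.map_cons, List.map_nil, List.mem_append, List.mem_cons]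
            rintro (h | h)
            · exact hbacc q (List.mem_cons_of_mem _ hq) h
            · simp at h
              exact hnd1.1 (h ▸ List.mem_map.mpr ⟨q, hq, rfl⟩))
        hnd1.2]
    congr 1
    · congr 1
      rw [List.filter_filter]
      exact List.filter_congr (fun e _ => by rw [hpred_def e, Bool.and_comm])
    · rw [List.append_assoc, List.singleton_append]
      congr 1
      congr 1
      · congr 1
        exact (List.filter_congr (fun e _ => (hhead e))).symm
      · exact List.map_congr_left (fun q hq => by
          rw [List.filter_filter]
          exact congrArg _ (List.filter_congr (fun e _ => by rw [htail q hq e, Bool.and_comm])))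

lemma mod_items (d : PySem.Dict String (PySem.Set (List Int))) (key : String) (f : PySem.Set (List Int) → PySem.Set (List Int))
    (hc : d.contains key = true) (hnd : d.keys.Nodup) :
    (d.insert key (f (d.getD key PySem.Set.empty))).items
      = d.items.map (fun q => if q.1 == key then (q.1, f q.2) else q) := by
  simp only [PySem.Dict.insert, hc, if_pos]
  refine List.map_congr_left ?_
  intro q hq
  by_cases h : q.1 = key
  · have h2 : d.getD key PySem.Set.empty = q.2 := by
      have : (key, q.2) ∈ d.items := by
        have : q = (key, q.2) := by rw [← h]
        exact this ▸ hq
      exact PySem.Dict.getD_of_mem_items d this hnd _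
    simp only [PySem.Set.empty] at h2
    simp [h, h2]
  · simp [h]

lemma route_fold_items (k : List Int → String) (E : List (List Int)) (d : PySem.Dict String (PySem.Set (List Int)))
    (hnd : d.keys.Nodup) (hk : ∀ e ∈ E, d.contains (k e) = true) :
    (E.foldl (fun d e => d.modify (k e) PySem.Set.empty (fun s => PySem.Set.add s e)) d).items
      = d.items.map (fun q => (q.1, (E.filter (fun e => k e == q.1)).foldl PySem.Set.add q.2)) := by
  induction E generalizing d with
  | nil => simp
  | cons e E ih =>
    have hce : d.contains (k e) = true := hk e (by simp)
    have hitems : (d.modify (k e) PySem.Set.empty (fun s => PySem.Set.add s e)).items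
        = d.items.map (fun q => if q.1 == k e then (q.1, PySem.Set.add q.2 e) else q) := by
      unfold PySem.Dict.modify
      exact mod_items d (k e) (fun s => PySem.Set.add s e) hce hnd
    have hkeys : (d.modify (k e) PySem.Set.empty (fun s => PySem.Set.add s e)).keys = d.keys := by
      simp only [PySem.Dict.keys, hitems, List.map_map]
      refine List.map_congr_left ?_
      intro q hq
      by_cases h : q.1 = k e <;> simp [h]
    rw [List.foldl_cons, ih _ (hkeys ▸ hnd)
      (by intro e' he'
          refine (PySem.Dict.contains_iff_mem_keys _ _).mpr ?_
          rw [hkeys]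
          exact (PySem.Dict.contains_iff_mem_keys _ _).mp (hk e' (List.mem_cons_of_mem _ he')))]
    rw [hitems, List.map_map]
    refine List.map_congr_left ?_
    intro q hq
    by_cases h : q.1 = k e
    · simp [Function.comp, h]
    · have hbe : (k e == q.1) = false := by simp [Ne.symm h]
      have hbe2 : (q.1 == k e) = false := by simp [h]
      simp [Function.comp, hbe, hbe2]

lemma get?_setdefault' (d : PySem.Dict Int String) (kk : Int) (v : String) (x : Int) :
    (d.setdefault kk v).get? x
      = match d.get? x with
        | some w => some w
        | none => if x = kk then some v else none := by
  by_cases hc : d.contains kk = true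
  · rw [PySem.Dict.setdefault_of_contains _ _ hc]
    cases hdx : d.get? x with
    | some w => simp
    | none =>
      simp only []
      by_cases hx : x = kk
      · subst hx
        rw [PySem.Dict.get?_eq_none_iff_contains] at hdx
        rw [hdx] at hc; simp at hc
      · simp [hx]
  · rw [PySem.Dict.setdefault_of_not_contains _ _ (by simpa using hc)]
    rw [PySem.Dict.get?_insert]
    by_cases hx : x = kk
    · subst hx
      have : d.get? x = none := by
        rw [PySem.Dict.get?_eq_none_iff_contains]; simpa using hc
      simp [this]
    · cases hdx : d.get? x <;> simp [hx]

lemma owner_inner (b : String) (l : List Int) (d : PySem.Dict Int String) (v : Int) :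
    ((l.foldl (fun d lab => d.setdefault lab b) d).get? v)
      = match d.get? v with
        | some w => some w
        | none => if v ∈ l then some b else none := by
  induction l generalizing d with
  | nil => cases hdx : d.get? v <;> simp [hdx]
  | cons lab l ih =>
    rw [List.foldl_cons, ih]
    rw [get?_setdefault']
    cases hdx : d.get? v with
    | some w => simp
    | none =>
      by_cases hx : v = lab
      · simp [hx]
      · simp [hx]

lemma owner_get? (bl : List (String × List Int)) (d : PySem.Dict Int String) (v : Int) :
    ((bl.foldl (fun d p => p.2.foldl (fun d lab => d.setdefault lab p.1) d) d).get? v)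
      = match d.get? v with
        | some w => some w
        | none => pvOwn bl v := by
  induction bl generalizing d with
  | nil => cases hdx : d.get? v <;> simp [hdx, pvOwn]
  | cons p rest ih =>
    rw [List.foldl_cons, ih, owner_inner]
    cases hdx : d.get? v with
    | some w => simp
    | none =>
      by_cases hx : v ∈ p.2
      · simp [hx, pvOwn]
      · simp [hx, pvOwn]

lemma pvRoute_getLast (default : String) (bl : List (String × List Int)) (e : List Int) (v : Int)
    (he : PySem.List.pyGet? e (-1) = some v) :
    pvRoute default bl e = (pvOwn bl v).getD default := by
  induction bl with
  | nil => simp [pvRoute, pvOwn]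
  | cons p rest ih =>
    have hli : pvLastIn p.2 e = decide (v ∈ p.2) := by
      unfold pvLastIn; rw [he]
    by_cases hx : v ∈ p.2
    · simp [pvRoute, pvOwn, hli, hx]
    · simp [pvRoute, pvOwn, hli, hx, ih]

lemma pvRoute_nil_edge (default : String) (bl : List (String × List Int)) :
    pvRoute default bl [] = default := by
  induction bl with
  | nil => rfl
  | cons p rest ih =>
    have hli : pvLastIn p.2 ([] : List Int) = false := by
      unfold pvLastIn
      rw [PySem.List.pyGet?_neg_one]
      rfl
    simp [pvRoute, hli, ih]

lemma filter_swap (p q : List Int → Bool) (S : List (List Int)) :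
    List.filter q (List.filter p S) = List.filter p (List.filter q S) := by
  rw [List.filter_filter, List.filter_filter]
  exact List.filter_congr (fun a _ => Bool.and_comm _ _)

lemma ofList_filter (p : List Int → Bool) (E : List (List Int)) :
    PySem.Set.ofList (E.filter p) = List.filter p (PySem.Set.ofList E) := by
  induction E with
  | nil => rfl
  | cons x xs ih =>
    by_cases hx : p x
    · rw [List.filter_cons_of_pos hx, PySem.Set.ofList_cons, PySem.Set.ofList_cons,
        List.filter_cons_of_pos hx, ih]
      congr 1
      unfold PySem.Set.discard
      exact filter_swap p _ _
    · rw [List.filter_cons_of_neg (by simpa using hx), ih, PySem.Set.ofList_cons,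
        List.filter_cons_of_neg (by simpa using hx)]
      unfold PySem.Set.discard
      rw [filter_swap]
      exact (List.filter_eq_self.mpr (fun a ha => by
        have hpa := (List.mem_filter.mp ha).2
        have hne : a ≠ x := fun h => hx (h ▸ hpa)
        simp [hne])).symm

lemma pvKeyB_eq_route (bl : List (String × List Int)) (default : String) (e : List Int) :
    pvKeyB (bl.foldl (fun d p => p.2.foldl (fun d lab => d.setdefault lab p.1) d) PySem.Dict.empty) default e
      = pvRoute default bl e := by
  by_cases he : e = []
  · subst he
    rw [pvRoute_nil_edge]
    rfl
  · have hv : ∃ v, PySem.List.pyGet? e (-1) = some v := by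
      rw [PySem.List.pyGet?_neg_one]
      exact ⟨e.getLast he, List.getLast?_eq_some_getLast he⟩
    obtain ⟨v, hv⟩ := hv
    unfold pvKeyB
    simp only [he, if_false, hv]
    rw [pvRoute_getLast default bl e v hv]
    unfold PySem.Dict.getD
    rw [owner_get?]
    have : (PySem.Dict.empty : PySem.Dict Int String).get? v = none := by rfl
    rw [this]

theorem organize_eq (edges : List (List Int)) (borders : List (String × List Int)) (default_border : String) :
    organize_edges edges borders default_border = organize_edges_alt edges borders default_border := by
  unfold organize_edges organize_edges_alt
  by_cases hc : (PySem.Dict.ofList borders).contains default_border = true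
  · simp [hc]
  · have hc' : (PySem.Dict.ofList borders).contains default_border = false := by simpa using hc
    simp only [hc', Bool.false_eq_true, if_false]
    have hnd : ((PySem.Dict.ofList borders).items.map Prod.fst).Nodup := by
      simpa [PySem.Dict.keys] using PySem.Dict.nodup_keys_ofList (ν := List Int) borders
    have hbld : ∀ p ∈ (PySem.Dict.ofList borders).items, p.1 ≠ default_border := by
      intro p hp h
      have hm : default_border ∈ (PySem.Dict.ofList borders).keys :=
        h ▸ PySem.Dict.mem_keys_of_mem_items _ hp
      have h2 := (PySem.Dict.contains_iff_mem_keys _ _).mpr hm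
      rw [hc'] at h2
      exact absurd h2 (by simp)
    have hA0 : (PySem.Dict.empty.insert default_border (PySem.Set.ofList edges) : PySem.Dict String (PySem.Set (List Int)))
        = PySem.Dict.mk [(default_border, PySem.Set.ofList edges)] := by rfl
    rw [hA0, A_fold_items default_border _ (PySem.Set.ofList edges) [] (by simp) hbld (by simp) hnd]
    -- B side: shape of the initial buckets dict
    have hB0 : ((PySem.Dict.ofList borders).items.foldl (fun d p => d.insert p.1 PySem.Set.empty)
          (PySem.Dict.empty.insert default_border PySem.Set.empty) : PySem.Dict String (PySem.Set (List Int)))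
        = PySem.Dict.mk ((default_border, PySem.Set.empty)
            :: (PySem.Dict.ofList borders).items.map (fun p => (p.1, PySem.Set.empty))) := by
      apply PySem.Dict.ext
      have hfresh : ∀ p ∈ (PySem.Dict.ofList borders).items,
          (PySem.Dict.mk [(default_border, (PySem.Set.empty : PySem.Set (List Int)))]).contains p.1 = false := by
        intro p hp
        simp only [PySem.Dict.contains, List.any_eq_false]
        intro q hq
        simp only [List.mem_singleton] at hq
        subst hq
        exact fun h => hbld p hp (eq_of_beq h).symm
      have := PySem.Dict.items_foldl_insert_fresh (PySem.Dict.ofList borders).items Prod.fst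
        (fun _ => (PySem.Set.empty : PySem.Set (List Int)))
        (PySem.Dict.mk [(default_border, PySem.Set.empty)]) hfresh hnd
      simpa using this
    rw [hB0]
    have hnd0 : (PySem.Dict.mk ((default_border, (PySem.Set.empty : PySem.Set (List Int)))
        :: (PySem.Dict.ofList borders).items.map (fun p => (p.1, PySem.Set.empty)))).keys.Nodup := by
      simp only [PySem.Dict.keys, List.map_cons, List.map_map]
      refine List.nodup_cons.mpr ⟨?_, ?_⟩
      · intro hmem
        have h3 : ∃ x, (default_border, x) ∈ (PySem.Dict.ofList borders).items := by simpa using hmem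
        obtain ⟨x, hx⟩ := h3
        exact hbld _ hx rfl
      · simpa using hnd
    have hk : ∀ e ∈ edges,
        (PySem.Dict.mk ((default_border, (PySem.Set.empty : PySem.Set (List Int)))
          :: (PySem.Dict.ofList borders).items.map (fun p => (p.1, PySem.Set.empty)))).contains
          (pvKeyB ((PySem.Dict.ofList borders).items.foldl
              (fun d p => p.2.foldl (fun d lab => d.setdefault lab p.1) d) PySem.Dict.empty)
            default_border e) = true := by
      intro e _
      rw [pvKeyB_eq_route]
      refine (PySem.Dict.contains_iff_mem_keys _ _).mpr ?_
      simp only [PySem.Dict.keys, List.map_cons, List.map_map, List.mem_cons]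
      rcases pvRoute_mem default_border (PySem.Dict.ofList borders).items e with h | h
      · left; exact h
      · right; simpa using h
    rw [route_fold_items _ edges _ hnd0 hk]
    have hval : ∀ x : String,
        List.foldl PySem.Set.add (PySem.Set.empty : PySem.Set (List Int))
          (edges.filter (fun e => pvKeyB ((PySem.Dict.ofList borders).items.foldl
              (fun d p => p.2.foldl (fun d lab => d.setdefault lab p.1) d) PySem.Dict.empty)
            default_border e == x))
        = (PySem.Set.ofList edges).filter (fun e => pvRoute default_border (PySem.Dict.ofList borders).items e == x) := by
      intro x
      rw [show edges.filter (fun e => pvKeyB ((PySem.Dict.ofList borders).items.foldl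
              (fun d p => p.2.foldl (fun d lab => d.setdefault lab p.1) d) PySem.Dict.empty)
            default_border e == x)
          = edges.filter (fun e => pvRoute default_border (PySem.Dict.ofList borders).items e == x) from
        List.filter_congr (fun e _ => by rw [pvKeyB_eq_route])]
      rw [← ofList_filter]
      exact (PySem.Set.ofList_eq_foldl _).symm
    simp only [List.map_cons, List.map_map, List.nil_append]
    congr 1
    · exact congrArg _ (hval default_border).symm
    · refine List.map_congr_left ?_
      intro q hq
      exact congrArg _ (hval q.1).symm

-- ===== VERDICT (by name: the statement is the Claim_ definition above) =====
theorem organize_edges_spec : Claim_equal_organize_edges := by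
  intro edges borders default_border _ _
  unfold Spec_organize_edges
  exact organize_eq edges borders default_border
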